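-- pv_equiv track=rewrite | github.com/kris-randen/leetcode-problems | 1641_medium_google_count_sorted_vowel_strings_dp.py | fibonacci_nd
-- ===== SOURCE A (Python) =====
-- def fibonacci_nd(k, n):
--     prev = [1] * (k + 1)
--     prev[0] = 0
--     curr = [1] * (k + 1)
--     curr[0] = 0
--
--     for i in range(1, n):
--         for k in range(1, k + 1):
--             curr[k] = curr[k - 1] + prev[k]
--         prev = curr
--
--     return sum(curr)
-- ===== SOURCE B (Python) =====
-- def fibonacci_nd(k, n):
--     # Closed form: for n >= 2 the DP total is C(n + k - 1, k - 1),
--     # computed as a falling product in O(min(k, n)); for n <= 1 the loop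
--     # never runs and the total is k.
--     if n <= 1:
--         return k
--     r = k - 1
--     if r < 0:
--         return 0
--     if n < r:
--         r = n  # C(n+k-1, k-1) = C(n+k-1, n), pick the smaller index
--     num = 1
--     for i in range(1, r + 1):
--         num = num * (n + k - r - 1 + i) // i
--     return num
-- ===== Notes on version B (the rewrite author's own statement) =====
-- stated objective: faster
-- what changed: Replaces the O(n*k) two-row prefix-sum DP with the closed form C(n+k-1, k-1) (hockey-stick identity), computed as an exact falling-factorial product of min(k-1, n) integer multiply/divide steps; n <= 1 returns k directly.
-- outside the precondition, e.g. on fibonacci_nd(-1, 3): A raises IndexError, B returns 0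
import Mathlib
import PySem

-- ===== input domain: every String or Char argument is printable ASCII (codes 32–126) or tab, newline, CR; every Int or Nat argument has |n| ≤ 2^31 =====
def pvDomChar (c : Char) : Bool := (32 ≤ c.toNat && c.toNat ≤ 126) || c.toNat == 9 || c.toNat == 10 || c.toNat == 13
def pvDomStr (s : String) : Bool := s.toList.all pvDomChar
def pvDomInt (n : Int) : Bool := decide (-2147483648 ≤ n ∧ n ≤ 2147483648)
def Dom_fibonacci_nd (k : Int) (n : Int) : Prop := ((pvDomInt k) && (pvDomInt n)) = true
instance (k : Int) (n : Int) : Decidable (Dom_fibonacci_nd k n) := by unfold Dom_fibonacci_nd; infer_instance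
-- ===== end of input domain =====

-- B replaces A's O(n·k) two-row DP by the closed form C(n+k-1, k-1) computed as a
-- falling product in O(min(k,n)) exact integer steps (asymptotically faster).

-- ===== PORT A =====
-- Python's `prev = curr` makes the two names alias one list; with persistent arrays this
-- is exactly snapshot semantics: during a pass, prev[j] is curr's value at the start of
-- the pass (index j is written only after it is read).  Python lists are ported as arrays
-- here (same O(1) element access); all indices are nonnegative and in range for k >= 0
-- (Pre_), so getD with default 0 / setIfInBounds are exact there.
def fibonacci_nd (k : Int) (n : Int) : Int :=
  let prev : Array Int := (Array.replicate (k+1).toNat (1:Int)).setIfInBounds 0 0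
  let curr : Array Int := (Array.replicate (k+1).toNat (1:Int)).setIfInBounds 0 0
  let st := (PySem.List.pyRange 1 n).foldl
    (fun (s : Array Int × Array Int) _i =>
      let curr' := (PySem.List.pyRange 1 (k+1)).foldl
        (fun c j => c.setIfInBounds j.toNat (c.getD (j.toNat - 1) 0 + s.1.getD j.toNat 0))
        s.2
      (curr', curr'))
    (prev, curr)
  st.2.sum

-- ===== PORT B =====
def fibonacci_nd_alt (k : Int) (n : Int) : Int :=
  if n ≤ 1 then k
  else
    let r := k - 1
    if r < 0 then 0
    else
      let r := if n < r then n else r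
      (PySem.List.pyRange 1 (r+1)).foldl
        (fun num i => PySem.Int.floordiv (num * (n + k - r - 1 + i)) i) 1

-- ===== PRECONDITION & SPEC =====
-- A raises IndexError at `prev[0] = 0` whenever k < 0 ([1]*(k+1) is then empty); those
-- inputs are excluded.
def Pre_fibonacci_nd (k : Int) (n : Int) : Prop := 0 ≤ k
instance (k : Int) (n : Int) : Decidable (Pre_fibonacci_nd k n) := by unfold Pre_fibonacci_nd; infer_instance
def pvWitness_fibonacci_nd : Int × Int := (3, 4)
def Spec_fibonacci_nd (k : Int) (n : Int) (out : Int) : Prop := out = fibonacci_nd_alt k n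
instance (k : Int) (n : Int) (out : Int) : Decidable (Spec_fibonacci_nd k n out) := by unfold Spec_fibonacci_nd; infer_instance

-- ===== CLAIM (what is proved, stated in full; the proofs are below) =====
def Claim_equal_fibonacci_nd : Prop := ∀ (k : Int) (n : Int), Dom_fibonacci_nd k n → Pre_fibonacci_nd k n → Spec_fibonacci_nd k n (fibonacci_nd k n)

-- ===== LEMMAS AND PROOFS =====

-- row entry after t prefix-sum passes: 0 at index 0, C(t+j-1, j-1) at index j ≥ 1
def eBin (t j : Nat) : Int := if j = 0 then 0 else ((t + j - 1).choose (j - 1) : Int)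

-- the whole row of length K+1
def Lrow (t K : Nat) : List Int := (List.range (K+1)).map (eBin t)

-- partially updated row: indices ≤ J already hold the next pass's values
def Prow (t J K : Nat) : List Int :=
  (List.range (K+1)).map (fun j => if j ≤ J then eBin (t+1) j else eBin t j)

-- list-level image of the port's inner loop body (p = the aliased prev row)
def innerL (p : List Int) (c : List Int) (j : Int) : List Int :=
  c.set j.toNat (c.getD (j.toNat - 1) 0 + p.getD j.toNat 0)

-- list-level image of the port's outer loop body
def outerL (K : Nat) (s : List Int × List Int) (_i : Int) : List Int × List Int :=
  let curr' := (PySem.List.pyRange 1 ((K:Int)+1)).foldl (innerL s.1) s.2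
  (curr', curr')

lemma eBin_pascal (t j : Nat) : eBin (t+1) j + eBin t (j+1) = eBin (t+1) (j+1) := by
  cases j with
  | zero => simp [eBin]
  | succ m =>
      simp only [eBin, if_neg (Nat.succ_ne_zero m), if_neg (Nat.succ_ne_zero (m+1))]
      rw [show t + 1 + (m + 1) - 1 = t + m + 1 by omega,
        show t + (m + 1 + 1) - 1 = t + m + 1 by omega,
        show t + 1 + (m + 1 + 1) - 1 = t + m + 2 by omega,
        show m + 1 - 1 = m by omega, show m + 1 + 1 - 1 = m + 1 by omega]
      have h4 : (t + m + 1).choose m + (t + m + 1).choose (m + 1) = (t + m + 2).choose (m + 1) := by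
        rw [show t + m + 2 = t + m + 1 + 1 by omega]
        exact (Nat.choose_succ_succ _ _).symm
      exact_mod_cast h4

lemma Lrow_zero (K : Nat) : Lrow 0 K = (List.replicate (K+1) (1:Int)).set 0 0 := by
  unfold Lrow
  rw [List.range_succ_eq_map, List.map_cons]
  have h0 : eBin 0 0 = 0 := by simp [eBin]
  have h1 : (List.range K).map (fun m => eBin 0 (Nat.succ m)) = List.replicate K 1 := by
    rw [List.eq_replicate_iff]
    constructor
    · simp
    · intro b hb
      simp only [List.mem_map] at hb
      obtain ⟨m, _, hm⟩ := hb
      simp [eBin, Nat.succ_eq_add_one] at hm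
      omega
  simp only [List.map_map, Function.comp_def] at *
  rw [h0, h1]
  cases K with
  | zero => simp
  | succ m => simp [List.replicate_succ]

lemma Prow_zero (t K : Nat) : Prow t 0 K = Lrow t K := by
  unfold Prow Lrow
  apply List.map_congr_left
  intro j _
  by_cases h : j ≤ 0
  · have : j = 0 := by omega
    simp [this, eBin]
  · simp [h]

lemma Prow_full (t K : Nat) : Prow t K K = Lrow (t+1) K := by
  unfold Prow Lrow
  apply List.map_congr_left
  intro j hj
  simp only [List.mem_range] at hj
  have : j ≤ K := by omega
  simp [this]

lemma set_map_range {β : Type} (f : Nat → β) (K j : Nat) (v : β) (hj : j < K) :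
    ((List.range K).map f).set j v = (List.range K).map (fun i => if i = j then v else f i) := by
  apply List.ext_getElem
  · simp
  · intro i h1 h2
    simp only [List.length_set, List.length_map, List.length_range] at h1
    rw [List.getElem_set]
    by_cases h : j = i
    · subst h; simp
    · simp only [List.getElem_map, List.getElem_range]
      rw [if_neg h, if_neg (by omega)]

-- one inner pass over j = 1..J updates the first J entries to the next row
lemma pass_partial (t K J : Nat) (_hJ : J ≤ K) :
    (PySem.List.pyRange 1 ((J:Int)+1)).foldl (innerL (Lrow t K)) (Lrow t K) = Prow t J K := by
  induction J with
  | zero =>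
      rw [show ((0:Nat):Int) + 1 = 1 from rfl]
      rw [show PySem.List.pyRange 1 1 = [] from rfl]
      simp [Prow_zero]
  | succ J ih =>
      have hJK : J ≤ K := by omega
      have hsplit : (PySem.List.pyRange 1 ((((J:Nat)+1):Int)+1)) =
          (PySem.List.pyRange 1 ((J:Int)+1)) ++ [(J:Int)+1] := by
        push_cast
        exact PySem.List.pyRange_one_succ_right (by omega)
      push_cast at hsplit ⊢
      rw [hsplit, List.foldl_append, ih hJK]
      simp only [List.foldl_cons, List.foldl_nil]
      unfold innerL
      rw [show ((J:Int)+1).toNat = J + 1 by omega, show J + 1 - 1 = J by omega]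
      have hg1 : (Prow t J K).getD J 0 = eBin (t+1) J := by
        unfold Prow
        rw [PySem.List.getD_map_range _ _ _ _ (by omega)]
        simp
      have hg2 : (Lrow t K).getD (J+1) 0 = eBin t (J+1) := by
        unfold Lrow
        rw [PySem.List.getD_map_range _ _ _ _ (by omega)]
      rw [hg1, hg2]
      unfold Prow
      rw [set_map_range _ _ _ _ (by omega)]
      apply List.map_congr_left
      intro i hi
      simp only [List.mem_range] at hi
      by_cases h : i = J + 1
      · subst h
        rw [if_pos rfl, if_pos (le_refl _), ← eBin_pascal]
      · rw [if_neg h]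
        by_cases h2 : i ≤ J
        · rw [if_pos h2, if_pos (by omega)]
        · rw [if_neg h2, if_neg (by omega)]

-- the outer loop only counts iterations: after t passes, both rows are Lrow t K
lemma outer_fold (K : Nat) (l : List Int) (t : Nat) :
    l.foldl (outerL K) (Lrow t K, Lrow t K) = (Lrow (t + l.length) K, Lrow (t + l.length) K) := by
  induction l generalizing t with
  | nil => simp
  | cons a l ih =>
      simp only [List.foldl_cons]
      have hstep : outerL K (Lrow t K, Lrow t K) a = (Lrow (t+1) K, Lrow (t+1) K) := by
        unfold outerL
        dsimp only
        rw [pass_partial t K K (le_refl _), Prow_full]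
      rw [hstep, ih (t+1)]
      simp only [List.length_cons]
      congr 2 <;> omega

-- Array.getD is List.getD on toList
lemma arr_getD (a : Array Int) (i : Nat) (d : Int) : a.getD i d = a.toList.getD i d := by
  rw [Array.getD_eq_getD_getElem?, List.getD_eq_getElem?_getD, Array.getElem?_toList]

-- the port's array-level inner loop projects, via toList, to innerL
lemma inner_hom (p c : Array Int) (b : Int) :
    ((PySem.List.pyRange 1 b).foldl
      (fun c j => c.setIfInBounds j.toNat (c.getD (j.toNat - 1) 0 + p.getD j.toNat 0)) c).toList
    = (PySem.List.pyRange 1 b).foldl (innerL p.toList) c.toList := by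
  refine (List.foldl_hom Array.toList ?_).symm
  intro x y
  unfold innerL
  rw [Array.toList_setIfInBounds, arr_getD, arr_getD]

-- the port's array-level outer loop projects, via toList on both rows, to outerL
lemma outer_hom (n : Int) (K : Nat) (init : Array Int × Array Int) :
    ((PySem.List.pyRange 1 n).foldl
      (fun (s : Array Int × Array Int) _i =>
        let curr' := (PySem.List.pyRange 1 ((K:Int)+1)).foldl
          (fun c j => c.setIfInBounds j.toNat (c.getD (j.toNat - 1) 0 + s.1.getD j.toNat 0))
          s.2
        (curr', curr'))
      init).2.toList
    = ((PySem.List.pyRange 1 n).foldl (outerL K) (init.1.toList, init.2.toList)).2 := by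
  have h := List.foldl_hom (l := PySem.List.pyRange 1 n)
    (f := fun s : Array Int × Array Int => (s.1.toList, s.2.toList))
    (g₁ := fun (s : Array Int × Array Int) (_i : Int) =>
      let curr' := (PySem.List.pyRange 1 ((K:Int)+1)).foldl
        (fun c j => c.setIfInBounds j.toNat (c.getD (j.toNat - 1) 0 + s.1.getD j.toNat 0))
        s.2
      (curr', curr'))
    (g₂ := outerL K)
    (init := init)
    (by
      intro x y
      unfold outerL
      dsimp only
      rw [inner_hom])
  exact congrArg Prod.snd h.symm

lemma sum_Lrow (t K : Nat) : (Lrow t K).sum = eBin (t+1) K := by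
  induction K with
  | zero => simp [Lrow, eBin]
  | succ K ih =>
      unfold Lrow
      rw [List.range_succ, List.map_append, List.sum_append]
      unfold Lrow at ih
      rw [ih]
      simp only [List.map_cons, List.map_nil, List.sum_cons, List.sum_nil, add_zero]
      exact eBin_pascal t K

-- A's value in closed form, for k = ↑K ≥ 0
lemma A_char (K : Nat) (n : Int) :
    fibonacci_nd (K : Int) n = eBin ((n-1).toNat + 1) K := by
  unfold fibonacci_nd
  rw [show ((K:Int)+1).toNat = K + 1 by omega]
  dsimp only
  rw [← Array.sum_toList, outer_hom]
  dsimp only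
  rw [Array.toList_setIfInBounds, Array.toList_replicate, ← Lrow_zero]
  rw [outer_fold]
  dsimp only
  rw [sum_Lrow]
  congr 1
  simp only [PySem.List.length_pyRange_one]
  omega

-- B's falling product computes a binomial coefficient exactly
lemma B_fold (a r : Nat) (hra : r ≤ a) (n k rI : Int) (hn : n + k - 1 = (a:Int)) (hr : rI = (r:Int)) :
    (PySem.List.pyRange 1 (rI+1)).foldl
      (fun num i => PySem.Int.floordiv (num * (n + k - rI - 1 + i)) i) 1
    = (a.choose r : Int) := by
  subst hr
  have key : ∀ s : Nat, s ≤ r →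
      (PySem.List.pyRange 1 ((s:Int)+1)).foldl
        (fun num i => PySem.Int.floordiv (num * (n + k - (r:Int) - 1 + i)) i) 1
      = ((a - r + s).choose s : Int) := by
    intro s hs
    induction s with
    | zero =>
        rw [show ((0:Nat):Int) + 1 = 1 from rfl, show PySem.List.pyRange 1 1 = [] from rfl]
        simp
    | succ s ih =>
        have hsr : s ≤ r := by omega
        have hsplit : (PySem.List.pyRange 1 (((s+1:Nat):Int)+1)) =
            (PySem.List.pyRange 1 ((s:Int)+1)) ++ [(s:Int)+1] := by
          push_cast
          exact PySem.List.pyRange_one_succ_right (by omega)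
        push_cast at hsplit ⊢
        rw [hsplit, List.foldl_append, ih hsr]
        simp only [List.foldl_cons, List.foldl_nil]
        have hb : n + k - (r:Int) - 1 + ((s:Int)+1) = ((a - r + s + 1 : Nat) : Int) := by
          omega
        rw [hb]
        have hN : (a - r + s).choose s * (a - r + s + 1) = (a - r + s + 1).choose (s+1) * (s+1) := by
          rw [mul_comm]
          exact Nat.add_one_mul_choose_eq _ _
        have hmul : ((a - r + s).choose s : Int) * ((a - r + s + 1 : Nat) : Int)
            = (((a - r + s + 1).choose (s+1) * (s+1) : Nat) : Int) := by
          exact_mod_cast hN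
        rw [hmul, show ((s:Int)+1) = (((s+1:Nat)):Int) by push_cast; ring,
          PySem.Int.floordiv_natCast]
        rw [Nat.mul_div_cancel _ (by omega),
          show a - r + s + 1 = a - r + (s + 1) by omega]
  have h := key r (le_refl r)
  rw [h]
  congr 2
  omega

lemma eBin_eq_choose_sub_one (t K : Nat) (hK : 1 ≤ K) :
    eBin t K = ((t + K - 1).choose (K - 1) : Int) := by
  unfold eBin
  rw [if_neg (by omega : ¬ K = 0)]

-- ===== VERDICT (by name: the statement is the Claim_ definition above) =====
theorem fibonacci_nd_spec : Claim_equal_fibonacci_nd := by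
  intro k n _hdom hk
  unfold Spec_fibonacci_nd
  have hk' : (0:Int) ≤ k := hk
  set K := k.toNat with hKdef
  have hkK : k = (K : Int) := by omega
  rw [hkK, A_char]
  unfold fibonacci_nd_alt
  by_cases hn : n ≤ 1
  · -- loop never runs: value is k
    rw [if_pos hn]
    have ht : (n-1).toNat = 0 := by omega
    rw [ht]
    cases K with
    | zero => simp [eBin]
    | succ m =>
        rw [eBin_eq_choose_sub_one _ _ (by omega)]
        have h1 : 1 + (m+1) - 1 = m + 1 := by omega
        have h2 : m + 1 - 1 = m := by omega
        rw [h1, h2]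
        have : (m+1).choose m = (m+1).choose 1 := by
          have h := Nat.choose_symm (n := m+1) (k := 1) (by omega)
          rwa [show m + 1 - 1 = m by omega] at h
        rw [this, Nat.choose_one_right]
  · rw [if_neg hn]
    by_cases hk0 : (K:Int) - 1 < 0
    · -- k = 0: every row is all zeros
      have : K = 0 := by omega
      simp [this, eBin]
    · rw [if_neg hk0]
      have hK1 : 1 ≤ K := by omega
      have hN : (n-1).toNat = (n-1).toNat := rfl
      set N : Nat := (n-1).toNat with hNdef
      have hnN : n = (N:Int) + 1 := by omega
      -- the chosen binomial index r = min(n, k-1)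
      by_cases hcmp : n < (K:Int) - 1
      · -- r = n
        rw [if_pos hcmp]
        show eBin (N+1) K = (PySem.List.pyRange 1 (n+1)).foldl
          (fun num i => PySem.Int.floordiv (num * (n + (K:Int) - n - 1 + i)) i) 1
        rw [B_fold (N + K) (N + 1) (by omega) n ((K:Int)) n (by omega) (by push_cast; omega)]
        rw [eBin_eq_choose_sub_one _ _ hK1]
        have h1 : N + 1 + K - 1 = N + K := by omega
        rw [h1]
        have hsym := Nat.choose_symm (n := N + K) (k := N + 1) (by omega)
        rw [show N + K - (N + 1) = K - 1 by omega] at hsym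
        rw [← hsym]
      · -- r = k - 1
        rw [if_neg hcmp]
        show eBin (N+1) K = (PySem.List.pyRange 1 ((K:Int) - 1 + 1)).foldl
          (fun num i => PySem.Int.floordiv (num * (n + (K:Int) - ((K:Int) - 1) - 1 + i)) i) 1
        rw [B_fold (N + K) (K - 1) (by omega) n ((K:Int)) ((K:Int) - 1) (by omega) (by omega)]
        rw [eBin_eq_choose_sub_one _ _ hK1, show N + 1 + K - 1 = N + K by omega]
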